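-- pv_equiv track=rewrite | github.com/PrinceSinghhub/InterviewBit-Dynamic-Programming | Interview Bit Dynamic Programming/Coins in a Line.py | maxcoin
-- ===== SOURCE A (Python) =====
-- def maxcoin(A):
--     '''
--     Solution by dynamic programming.
--        dp[i][j] = maximum score possible for current player for subgame A[i:j]
--     Base cases, only one option:
--        dp[i][i+1] = A[i]
--     Otherwise, we pick at either end, eventually getting
--     all the coins but the ones picked by next player:
--        dp[i][j] = sum(A[i:j]) - min(dp[i+1][j], dp[i][j-1])
--
--     Now, we only have to maintain one column (j-1) to ozzbtain new one (j).
--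
--     Time: O(n**2)   Space: O(n)
--     '''
--
--     n = len(A)
--     dp = [None] * n
--
--     for j in range(1, n + 1):
--         dp[j - 1] = A[j - 1]  # dp[j-1][j]
--         total = A[j - 1]
--         # dp[i+1][j] must be already computed, so we iterate backward
--         for i in range(j - 2, -1, -1):
--             total += A[i]  # sum[i:j]
--             dp[i] = total - min(dp[i + 1], dp[i])
--
--     return dp[0]
-- ===== SOURCE B (Python) =====
-- def maxcoin(A):
--     # Difference DP: d[i] = best (current player - opponent) score for the
--     # length-L subgame A[i:i+L]; answer = (sum(A) + d[0]) // 2.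
--     n = len(A)
--     d = [0] * (n + 1)  # length-0 subgames: difference 0
--     for L in range(1, n + 1):
--         for i in range(n - L + 1):
--             d[i] = max(A[i] - d[i + 1], A[i + L - 1] - d[i])
--     return (sum(A) + d[0]) // 2
-- ===== Notes on version B (the rewrite author's own statement) =====
-- stated objective: alternative
-- what changed: B replaces A's max-score DP (score = subrange sum minus opponent's min) and its rolling column indexed by the right endpoint with a score-difference DP over interval lengths (max of taking the left or right coin minus the opponent's difference, no subrange sums), recovering the answer as half of total-plus-difference via integer division.
import Mathlib
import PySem

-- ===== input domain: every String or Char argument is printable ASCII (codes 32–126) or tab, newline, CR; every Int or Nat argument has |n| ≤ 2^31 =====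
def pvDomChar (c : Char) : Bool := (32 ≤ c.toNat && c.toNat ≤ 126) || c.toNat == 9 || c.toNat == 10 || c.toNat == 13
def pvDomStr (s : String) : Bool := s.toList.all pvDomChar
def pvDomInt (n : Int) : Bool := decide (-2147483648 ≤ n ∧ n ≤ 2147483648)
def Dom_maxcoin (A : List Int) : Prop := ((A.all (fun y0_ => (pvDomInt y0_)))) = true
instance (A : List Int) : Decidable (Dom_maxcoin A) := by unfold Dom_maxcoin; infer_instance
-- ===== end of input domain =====

-- B replaces A's max-score rolling-column DP with a score-difference DP over interval
-- lengths, combining with sum(A) at the end; equivalence is proved on non-empty lists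
-- (on the empty list A raises IndexError; that input is excluded by Pre_maxcoin).

-- ===== PORT A =====
-- inner loop body: total += A[i]; dp[i] = total - min(dp[i+1], dp[i])
def stepA (A : List Int) (st : Int × List Int) (i : Int) : Int × List Int :=
  let total := st.1 + PySem.List.pyGetD A i 0
  (total, PySem.List.pySetD st.2 i
    (total - min (PySem.List.pyGetD st.2 (i+1) 0) (PySem.List.pyGetD st.2 i 0)))

-- one outer iteration (one value of j)
def rowA (A : List Int) (dp : List Int) (j : Int) : List Int :=
  let dp := PySem.List.pySetD dp (j-1) (PySem.List.pyGetD A (j-1) 0)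
  let total := PySem.List.pyGetD A (j-1) 0
  ((PySem.List.pyRange (j-2) (-1) (-1)).foldl (stepA A) (total, dp)).2

def maxcoin (A : List Int) : Int :=
  let n := A.length
  -- dp = [None] * n : the 0 placeholders are never read before being assigned
  let dp : List Int := List.replicate n 0
  let dp := (PySem.List.pyRange 1 ((n : Int) + 1) 1).foldl (rowA A) dp
  PySem.List.pyGetD dp 0 0  -- dp[0]; IndexError on [] is excluded by Pre_maxcoin

-- ===== PORT B =====
-- d[i] = max(A[i] - d[i+1], A[i+L-1] - d[i])
def stepB (A : List Int) (L : Int) (d : List Int) (i : Int) : List Int :=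
  PySem.List.pySetD d i
    (max (PySem.List.pyGetD A i 0 - PySem.List.pyGetD d (i+1) 0)
         (PySem.List.pyGetD A (i + L - 1) 0 - PySem.List.pyGetD d i 0))

def maxcoin_alt (A : List Int) : Int :=
  let n := A.length
  let d : List Int := List.replicate (n + 1) 0
  let d := (PySem.List.pyRange 1 ((n : Int) + 1) 1).foldl
    (fun d L => (PySem.List.pyRange 0 ((n : Int) - L + 1) 1).foldl (stepB A L) d) d
  PySem.Int.floordiv (A.sum + PySem.List.pyGetD d 0 0) 2

-- ===== PRECONDITION & SPEC =====
-- Pre_ excludes exactly the empty list, on which A raises IndexError (indexing an empty table).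
def Pre_maxcoin (A : List Int) : Prop := A ≠ []
instance (A : List Int) : Decidable (Pre_maxcoin A) := by unfold Pre_maxcoin; infer_instance
def pvWitness_maxcoin : List Int := ([3, 1, 2, 7])

def Spec_maxcoin (A : List Int) (out : Int) : Prop := out = maxcoin_alt A
instance (A : List Int) (out : Int) : Decidable (Spec_maxcoin A out) := by unfold Spec_maxcoin; infer_instance

-- ===== CLAIM (what is proved, stated in full; the proofs are below) =====
def Claim_equal_maxcoin : Prop := ∀ (A : List Int), Dom_maxcoin A → Pre_maxcoin A → Spec_maxcoin A (maxcoin A)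

-- ===== LEMMAS AND PROOFS =====

-- sum(A[i:j])
def subSum (A : List Int) (i j : Nat) : Int := ((A.drop i).take (j - i)).sum

-- the mathematical value of A's dp[i][j]: best score for the current player on A[i:j]
def gSpec (A : List Int) (i j : Nat) : Int :=
  if _h : i + 1 < j then
    subSum A i j - min (gSpec A (i+1) j) (gSpec A i (j-1))
  else A.getD i 0
termination_by j - i
decreasing_by all_goals omega

-- the mathematical value of B's d[i] for the length-(j-i) round: best score difference on A[i:j]
def dSpec (A : List Int) (i j : Nat) : Int :=
  if _h : i < j then
    max (A.getD i 0 - dSpec A (i+1) j) (A.getD (j-1) 0 - dSpec A i (j-1))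
  else 0
termination_by j - i
decreasing_by all_goals omega

theorem dSpec_self (A : List Int) (i : Nat) : dSpec A i i = 0 := by unfold dSpec; simp

theorem getD_set_self (l : List Int) (t : Nat) (v : Int) (h : t < l.length) :
    (l.set t v).getD t 0 = v := by simp [List.getD, h]

theorem getD_set_ne (l : List Int) (t k : Nat) (v : Int) (h : k ≠ t) :
    (l.set t v).getD k 0 = l.getD k 0 := by
  rw [List.getD, List.getD, List.getElem?_set_ne (by omega)]

theorem subSum_left (A : List Int) (i j : Nat) (hij : i < j) (hj : j ≤ A.length) :
    subSum A i j = A.getD i 0 + subSum A (i+1) j := by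
  have hi : i < A.length := lt_of_lt_of_le hij hj
  unfold subSum
  rw [List.getD_eq_getElem _ _ hi, List.drop_eq_getElem_cons hi]
  have : j - i = (j - (i+1)) + 1 := by omega
  rw [this, List.take_succ_cons, List.sum_cons]

theorem subSum_right (A : List Int) (i j : Nat) (hij : i < j) (hj : j ≤ A.length) :
    subSum A i j = subSum A i (j-1) + A.getD (j-1) 0 := by
  have h1 : j - 1 < A.length := by omega
  unfold subSum
  have : j - i = (j - 1 - i) + 1 := by omega
  rw [this, List.take_add_one, List.sum_append]
  have hidx : j - 1 - i < (A.drop i).length := by simp; omega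
  rw [List.getElem?_eq_getElem hidx, List.getElem_drop, List.getD_eq_getElem _ _ h1]
  simp
  congr 1
  omega

theorem two_gSpec (A : List Int) : ∀ (f i j : Nat), j - i ≤ f → i < j → j ≤ A.length →
    2 * gSpec A i j = subSum A i j + dSpec A i j := by
  intro f
  induction f with
  | zero => intro i j hf hij _; omega
  | succ f ih =>
    intro i j hf hij hj
    by_cases h : i + 1 < j
    · rw [gSpec, dif_pos h, dSpec, dif_pos hij]
      have ih1 := ih (i+1) j (by omega) (by omega) hj
      have ih2 := ih i (j-1) (by omega) (by omega) (by omega)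
      have h1 := subSum_left A i j hij hj
      have h2 := subSum_right A i j hij hj
      omega
    · have hj1 : j = i + 1 := by omega
      subst hj1
      rw [gSpec, dif_neg h, dSpec, dif_pos hij]
      have h1 := subSum_left A i (i+1) hij hj
      have h2 : subSum A (i+1) (i+1) = 0 := by unfold subSum; simp
      simp only [dSpec_self, Nat.add_sub_cancel]
      omega

theorem innerA (A : List Int) (j : Nat) (hj1 : 1 ≤ j) (hjn : j ≤ A.length) :
    ∀ (t : Nat) (dp : List Int), t ≤ j - 1 → dp.length = A.length →
    (∀ k, t ≤ k → k < j → dp.getD k 0 = gSpec A k j) →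
    (∀ k, k < t → dp.getD k 0 = gSpec A k (j-1)) →
    ((PySem.List.pyRange ((t:Int) - 1) (-1) (-1)).foldl (stepA A) (subSum A t j, dp)).2.length = A.length ∧
    ∀ k, k < j → ((PySem.List.pyRange ((t:Int) - 1) (-1) (-1)).foldl (stepA A) (subSum A t j, dp)).2.getD k 0 = gSpec A k j := by
  intro t
  induction t with
  | zero =>
    intro dp _ hlen hDone _
    rw [PySem.List.pyRange_neg_one_eq_nil (by omega)]
    exact ⟨hlen, fun k hk => hDone k (by omega) hk⟩
  | succ t ih =>
    intro dp ht hlen hDone hPrev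
    have e1 : ((t+1 : Nat) : Int) - 1 = (t : Int) := by omega
    rw [e1, PySem.List.pyRange_neg_one_cons (by omega), List.foldl_cons]
    have hstep : stepA A (subSum A (t+1) j, dp) (t:Int) =
        (subSum A t j, dp.set t (gSpec A t j)) := by
      unfold stepA
      dsimp only
      have e2 : (t:Int) + 1 = ((t+1 : Nat) : Int) := by omega
      rw [e2, PySem.List.pySetD_natCast, PySem.List.pyGetD_natCast, PySem.List.pyGetD_natCast,
          PySem.List.pyGetD_natCast]
      have hsum : subSum A (t+1) j + A.getD t 0 = subSum A t j := by
        rw [subSum_left A t j (by omega) hjn]; ring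
      rw [hsum]
      have hd1 : dp.getD (t+1) 0 = gSpec A (t+1) j := hDone (t+1) le_rfl (by omega)
      have hd2 : dp.getD t 0 = gSpec A t (j-1) := hPrev t (by omega)
      rw [hd1, hd2]
      have hg : gSpec A t j = subSum A t j - min (gSpec A (t+1) j) (gSpec A t (j-1)) := by
        rw [gSpec, dif_pos (by omega : t + 1 < j)]
      rw [← hg]
    rw [hstep]
    exact ih _ (by omega) (by simpa using hlen)
      (fun k hk1 hk2 => by
        by_cases h : k = t
        · subst h; rw [getD_set_self _ _ _ (by omega)]
        · rw [getD_set_ne _ _ _ _ h]; exact hDone k (by omega) hk2)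
      (fun k hk => by rw [getD_set_ne _ _ _ _ (by omega)]; exact hPrev k (by omega))

theorem outerA (A : List Int) : ∀ (m : Nat), m ≤ A.length →
    ((PySem.List.pyRange 1 ((m:Int) + 1) 1).foldl (rowA A) (List.replicate A.length 0)).length = A.length ∧
    ∀ i, i < m → ((PySem.List.pyRange 1 ((m:Int) + 1) 1).foldl (rowA A) (List.replicate A.length 0)).getD i 0 = gSpec A i m := by
  intro m
  induction m with
  | zero =>
    intro _
    rw [PySem.List.pyRange_one_eq_nil (by omega)]
    exact ⟨by simp, fun i hi => absurd hi (by omega)⟩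
  | succ m ih =>
    intro hm
    have e1 : ((m+1 : Nat) : Int) + 1 = ((m:Int) + 1) + 1 := by omega
    rw [e1, PySem.List.pyRange_one_succ_right (by omega), List.foldl_append, List.foldl_cons,
        List.foldl_nil]
    obtain ⟨hlen, hvals⟩ := ih (by omega)
    set dp := (PySem.List.pyRange 1 ((m:Int) + 1) 1).foldl (rowA A) (List.replicate A.length 0) with hdp
    have hrow : rowA A dp ((m:Int) + 1) =
        ((PySem.List.pyRange ((m:Int) - 1) (-1) (-1)).foldl (stepA A)
          (subSum A m (m+1), dp.set m (gSpec A m (m+1)))).2 := by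
      unfold rowA
      have e2 : (m:Int) + 1 - 1 = ((m:Nat) : Int) := by omega
      have e3 : (m:Int) + 1 - 2 = ((m:Nat) : Int) - 1 := by omega
      rw [e2, e3, PySem.List.pySetD_natCast, PySem.List.pyGetD_natCast]
      have hbase : A.getD m 0 = gSpec A m (m+1) := by
        rw [gSpec, dif_neg (by omega : ¬ (m + 1 < m + 1))]
      have hsum : A.getD m 0 = subSum A m (m+1) := by
        rw [subSum_left A m (m+1) (by omega) (by omega)]
        unfold subSum
        simp
      rw [hbase]
      rw [← hbase, hsum]
    rw [hrow]
    have := innerA A (m+1) (by omega) (by omega) m (dp.set m (gSpec A m (m+1)))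
      (by omega) (by simpa using hlen)
      (fun k hk1 hk2 => by
        have : k = m := by omega
        subst this
        exact getD_set_self _ _ _ (by omega))
      (fun k hk => by
        rw [getD_set_ne _ _ _ _ (by omega), hvals k hk]
        congr 1)
    exact ⟨this.1, this.2⟩

theorem maxcoin_eq (A : List Int) (h : A ≠ []) :
    maxcoin A = gSpec A 0 A.length := by
  unfold maxcoin
  obtain ⟨hlen, hvals⟩ := outerA A A.length le_rfl
  simp only []
  rw [PySem.List.pyGetD_zero, hvals 0 (by simp [List.length_pos_iff]; exact h)]

theorem innerB (A : List Int) (L : Nat) (hL1 : 1 ≤ L) (hLn : L ≤ A.length) :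
    ∀ (c m : Nat), m + c = A.length - L + 1 → ∀ (d : List Int), d.length = A.length + 1 →
    (∀ k, k < m → d.getD k 0 = dSpec A k (k+L)) →
    (∀ k, m ≤ k → k ≤ A.length → d.getD k 0 = dSpec A k (min (k+L-1) A.length)) →
    ((PySem.List.pyRange (m:Int) ((A.length:Int) - (L:Int) + 1) 1).foldl (stepB A (L:Int)) d).length = A.length + 1 ∧
    ∀ k, k ≤ A.length → ((PySem.List.pyRange (m:Int) ((A.length:Int) - (L:Int) + 1) 1).foldl (stepB A (L:Int)) d).getD k 0 = dSpec A k (min (k+L) A.length) := by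
  intro c
  induction c with
  | zero =>
    intro m hm d hlen hNew hOld
    rw [PySem.List.pyRange_one_eq_nil (by omega)]
    refine ⟨hlen, fun k hk => ?_⟩
    simp only [List.foldl_nil]
    by_cases h : k < m
    · rw [hNew k h]; congr 1; omega
    · rw [hOld k (by omega) hk]; congr 1; omega
  | succ c ih =>
    intro m hm d hlen hNew hOld
    have hmn : m ≤ A.length - L := by omega
    rw [PySem.List.pyRange_one_cons (by omega), List.foldl_cons]
    have hstep : stepB A (L:Int) d (m:Int) =
        d.set m (dSpec A m (m+L)) := by
      unfold stepB
      have e1 : (m:Int) + 1 = ((m+1 : Nat) : Int) := by omega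
      have e2 : (m:Int) + (L:Int) - 1 = ((m+L-1 : Nat) : Int) := by omega
      rw [e1, e2]
      rw [PySem.List.pySetD_natCast, PySem.List.pyGetD_natCast, PySem.List.pyGetD_natCast,
          PySem.List.pyGetD_natCast, PySem.List.pyGetD_natCast]
      rw [hOld (m+1) (by omega) (by omega), hOld m (by omega) (by omega)]
      have e3 : min (m+1+L-1) A.length = m + L := by omega
      have e4 : min (m+L-1) A.length = m + L - 1 := by omega
      rw [e3, e4]
      conv_rhs => rw [dSpec]
      rw [dif_pos (by omega : m < m + L)]
    rw [hstep]
    have e5 : (m:Int) + 1 = ((m+1 : Nat) : Int) := by push_cast; ring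
    rw [e5]
    exact ih (m+1) (by omega) _ (by simpa using hlen)
      (fun k hk => by
        by_cases h : k = m
        · subst h; exact getD_set_self _ _ _ (by omega)
        · rw [getD_set_ne _ _ _ _ h]; exact hNew k (by omega))
      (fun k hk1 hk2 => by
        rw [getD_set_ne _ _ _ _ (by omega)]; exact hOld k (by omega) hk2)

theorem outerB (A : List Int) : ∀ (Lm : Nat), Lm ≤ A.length →
    ((PySem.List.pyRange 1 ((Lm:Int) + 1) 1).foldl
      (fun d L => (PySem.List.pyRange 0 ((A.length:Int) - L + 1) 1).foldl (stepB A L) d)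
      (List.replicate (A.length + 1) 0)).length = A.length + 1 ∧
    ∀ k, k ≤ A.length →
    ((PySem.List.pyRange 1 ((Lm:Int) + 1) 1).foldl
      (fun d L => (PySem.List.pyRange 0 ((A.length:Int) - L + 1) 1).foldl (stepB A L) d)
      (List.replicate (A.length + 1) 0)).getD k 0 = dSpec A k (min (k + Lm) A.length) := by
  intro Lm
  induction Lm with
  | zero =>
    intro _
    rw [PySem.List.pyRange_one_eq_nil (by omega)]
    refine ⟨by simp, fun k hk => ?_⟩
    simp only [List.foldl_nil]
    rw [List.getD_eq_getElem _ _ (by simp; omega), List.getElem_replicate]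
    have : min (k + 0) A.length = k := by omega
    rw [this, dSpec_self]
  | succ Lm ih =>
    intro hLm
    have e1 : ((Lm+1 : Nat) : Int) + 1 = ((Lm:Int) + 1) + 1 := by omega
    rw [e1, PySem.List.pyRange_one_succ_right (by omega), List.foldl_append, List.foldl_cons,
        List.foldl_nil]
    obtain ⟨hlen, hvals⟩ := ih (by omega)
    have e2 : (Lm:Int) + 1 = ((Lm+1 : Nat) : Int) := by omega
    have e0 : (0:Int) = ((0:Nat) : Int) := rfl
    rw [e2, e0]
    have := innerB A (Lm+1) (by omega) (by omega) (A.length - (Lm+1) + 1) 0 (by omega)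
      _ hlen (fun k hk => absurd hk (by omega))
      (fun k hk1 hk2 => by rw [hvals k hk2]; congr 1)
    refine ⟨this.1, fun k hk => ?_⟩
    exact this.2 k hk

theorem maxcoin_alt_eq (A : List Int) :
    maxcoin_alt A = PySem.Int.floordiv (A.sum + dSpec A 0 A.length) 2 := by
  unfold maxcoin_alt
  obtain ⟨hlen, hvals⟩ := outerB A A.length le_rfl
  simp only []
  rw [PySem.List.pyGetD_zero, hvals 0 (by omega)]
  have e : min (0 + A.length) A.length = A.length := by omega
  rw [e]

-- ===== VERDICT (by name: the statement is the Claim_ definition above) =====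
theorem maxcoin_spec : Claim_equal_maxcoin := by
  intro A _ hpre
  unfold Spec_maxcoin
  rw [maxcoin_eq A hpre, maxcoin_alt_eq A]
  have hn : 0 < A.length := List.length_pos_iff.mpr hpre
  have hb := two_gSpec A A.length 0 A.length (by omega) hn le_rfl
  have hsum : A.sum = subSum A 0 A.length := by unfold subSum; simp
  rw [hsum, ← hb, PySem.Int.floordiv_eq_ediv_of_pos (by omega)]
  omega
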